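-- pv_equiv track=rewrite | github.com/meval65/openBot | src/services/terminal/service.py | normalize_container_name
-- ===== SOURCE A (Python) =====
-- def normalize_container_name(name: str, fallback: str = "bot") -> str:
--     raw = str(name or "").strip().lower()
--     cleaned = "".join(ch if (ch.isalnum() or ch in {"-", "_"}) else "-" for ch in raw)
--     cleaned = _re_sub_multi_dash(cleaned).strip("-_")
--     if not cleaned:
--         cleaned = str(fallback or "bot").strip().lower() or "bot"
--         cleaned = "".join(ch if (ch.isalnum() or ch in {"-", "_"}) else "-" for ch in cleaned)
--         cleaned = _re_sub_multi_dash(cleaned).strip("-_") or "bot"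
--     return cleaned
--
-- def _re_sub_multi_dash(text: str) -> str:
--     out = []
--     prev_dash = False
--     for ch in str(text or ""):
--         if ch == "-":
--             if prev_dash:
--                 continue
--             prev_dash = True
--             out.append(ch)
--         else:
--             prev_dash = False
--             out.append(ch)
--     return "".join(out)
-- ===== SOURCE B (Python) =====
-- def slug(s):
--     text = str(s or "").strip().lower()
--     words = []
--     cur = []
--     for ch in text:
--         if ch.isalnum() or ch == "_":
--             cur.append(ch)
--         else:
--             if cur:
--                 words.append("".join(cur))
--             cur = []
--     if cur:
--         words.append("".join(cur))
--     return "-".join(words).strip("-_")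
--
--
-- def normalize_container_name(name: str, fallback: str = "bot") -> str:
--     return slug(name) or slug(fallback) or "bot"
-- ===== Notes on version B (the rewrite author's own statement) =====
-- stated objective: alternative
-- what changed: B never substitutes bad characters or collapses dash runs: it tokenizes the lowered input into maximal runs of alphanumerics/underscore, joins the tokens with single dashes and strips the edges, whereas A maps every bad char to a dash, runs a second collapsing pass and strips; one slug() helper serves both the name and the fallback.
import Mathlib
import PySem

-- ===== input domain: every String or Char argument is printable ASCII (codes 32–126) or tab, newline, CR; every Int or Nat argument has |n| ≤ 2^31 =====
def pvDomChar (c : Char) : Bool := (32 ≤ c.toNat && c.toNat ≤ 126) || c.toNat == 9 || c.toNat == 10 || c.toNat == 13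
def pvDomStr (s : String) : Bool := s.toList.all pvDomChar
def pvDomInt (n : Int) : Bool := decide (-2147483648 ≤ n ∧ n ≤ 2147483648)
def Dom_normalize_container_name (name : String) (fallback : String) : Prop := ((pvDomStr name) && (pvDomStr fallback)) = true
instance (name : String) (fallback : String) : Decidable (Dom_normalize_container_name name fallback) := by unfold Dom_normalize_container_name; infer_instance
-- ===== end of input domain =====

-- B is a different algorithm: instead of A's replace-bad-chars-with-'-' pass followed by a
-- dash-collapsing pass, B tokenizes the lowered input into maximal runs of [alnum or '_'] and
-- joins the tokens with single dashes, one slug() helper serving name and fallback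
-- (objective: alternative).

-- ===== PORT A =====
-- port of _re_sub_multi_dash
def pyMultiDash (text : List Char) : List Char :=
  (text.foldl (fun (st : List Char × Bool) ch =>
      if ch == '-' then (if st.2 then st else (st.1 ++ ['-'], true))
      else (st.1 ++ [ch], false)) ([], false)).1

def normalize_container_name (name : String) (fallback : String) : String :=
  let raw := PySem.Chars.lower (PySem.Chars.strip (if name = "" then "" else name).toList)
  let cleaned := raw.map (fun ch => if PySem.Chars.isalnum ch || ch == '-' || ch == '_' then ch else '-')
  let cleaned2 := PySem.Chars.stripChars (pyMultiDash cleaned) ['-', '_']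
  if cleaned2 = [] then
    let fb := (if fallback = "" then "bot" else fallback)
    let c0 := PySem.Chars.lower (PySem.Chars.strip fb.toList)
    let c1 := if c0 = [] then "bot".toList else c0
    let c2 := c1.map (fun ch => if PySem.Chars.isalnum ch || ch == '-' || ch == '_' then ch else '-')
    let c3 := PySem.Chars.stripChars (pyMultiDash c2) ['-', '_']
    String.mk (if c3 = [] then "bot".toList else c3)
  else String.mk cleaned2

-- ===== PORT B =====
-- port of Source B's slug: tokenize into maximal runs of [alnum or '_'], join with '-', strip edges
def slugChars (s : String) : List Char :=
  let text := PySem.Chars.lower (PySem.Chars.strip (if s = "" then "" else s).toList)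
  let st := text.foldl (fun (st : List (List Char) × List Char) ch =>
      if PySem.Chars.isalnum ch || ch == '_' then (st.1, st.2 ++ [ch])
      else (if st.2 = [] then (st.1, ([] : List Char)) else (st.1 ++ [st.2], []))) ([], [])
  let words := if st.2 = [] then st.1 else st.1 ++ [st.2]
  PySem.Chars.stripChars (PySem.Chars.join ['-'] words) ['-', '_']

def normalize_container_name_alt (name : String) (fallback : String) : String :=
  let a := slugChars name
  if a ≠ [] then String.mk a
  else
    let b := slugChars fallback
    if b ≠ [] then String.mk b else "bot"

-- ===== PRECONDITION & SPEC =====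
def Spec_normalize_container_name (name : String) (fallback : String) (out : String) : Prop := out = normalize_container_name_alt name fallback
instance (name : String) (fallback : String) (out : String) : Decidable (Spec_normalize_container_name name fallback out) := by unfold Spec_normalize_container_name; infer_instance

-- ===== CLAIM (what is proved, stated in full; the proofs are below) =====
def Claim_equal_normalize_container_name : Prop := ∀ (name : String) (fallback : String), Dom_normalize_container_name name fallback → Spec_normalize_container_name name fallback (normalize_container_name name fallback)

-- ===== LEMMAS AND PROOFS =====

-- B-side char class: alnum or underscore
def allowedC (c : Char) : Bool := PySem.Chars.isalnum c || c == '_'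
-- A-side char map
def fC (c : Char) : Char := if PySem.Chars.isalnum c || c == '-' || c == '_' then c else '-'

-- the two fold step functions, named for the lemmas (syntactically the ports' lambdas)
def stepA (st : List Char × Bool) (ch : Char) : List Char × Bool :=
  if ch == '-' then (if st.2 then st else (st.1 ++ ['-'], true)) else (st.1 ++ [ch], false)

def stepB (st : List (List Char) × List Char) (ch : Char) : List (List Char) × List Char :=
  if PySem.Chars.isalnum ch || ch == '_' then (st.1, st.2 ++ [ch])
  else (if st.2 = [] then (st.1, ([] : List Char)) else (st.1 ++ [st.2], []))

def finB (st : List (List Char) × List Char) : List (List Char) :=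
  if st.2 = [] then st.1 else st.1 ++ [st.2]

theorem fC_allowed (c : Char) (h : allowedC c = true) : fC c = c ∧ (c == '-') = false := by
  by_cases hc : c = '-'
  · subst hc; simp [allowedC] at h; exact absurd h (by decide)
  · unfold allowedC at h
    unfold fC
    rcases Bool.or_eq_true_iff.1 h with h1 | h1
    · simp [h1, hc]
    · simp [beq_iff_eq] at h1; subst h1; simp

theorem fC_not (c : Char) (h : allowedC c = false) : fC c = '-' := by
  unfold allowedC at h
  simp only [Bool.or_eq_false_iff] at h
  unfold fC
  by_cases hc : c = '-'
  · subst hc; simp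
  · simp [h.1, h.2, hc]

-- A's collapsing scan, written as structural recursion on the ORIGINAL chars
def gA (p : Bool) : List Char → List Char
  | [] => []
  | c :: cs => if allowedC c then c :: gA false cs else (if p then gA true cs else '-' :: gA true cs)

-- (SR cs).1 = B's joined words of cs starting between words; (SR cs).2 = same starting mid-word
def SR : List Char → List Char × List Char
  | [] => ([], [])
  | c :: cs =>
      let sr := SR cs
      if allowedC c then (c :: sr.2, c :: sr.2)
      else (sr.1, if sr.1 = [] then [] else '-' :: sr.1)

-- B's word tokenizer, recursion on the chars with the current partial word
def Wrec (cur : List Char) : List Char → List (List Char)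
  | [] => if cur = [] then [] else [cur]
  | c :: cs => if allowedC c then Wrec (cur ++ [c]) cs else (if cur = [] then Wrec [] cs else cur :: Wrec [] cs)

-- A's fold = gA
theorem foldMD_eq_gA (cs : List Char) : ∀ (o : List Char) (p : Bool),
    ((cs.map fC).foldl stepA (o, p)).1 = o ++ gA p cs := by
  induction cs with
  | nil => intro o p; simp [gA]
  | cons c cs ih =>
    intro o p
    simp only [List.map_cons, List.foldl_cons]
    by_cases h : allowedC c = true
    · obtain ⟨h1, h2⟩ := fC_allowed c h
      rw [h1]
      simp only [stepA, h2, Bool.false_eq_true, if_false, ih, gA, h, if_true]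
      simp
    · rw [fC_not c (by simpa using h)]
      simp only [stepA, beq_self_eq_true, if_true, gA, h, Bool.false_eq_true, if_false]
      cases p with
      | true => simp [ih]
      | false => simp [ih]

-- B's fold = Wrec
theorem foldB_eq_Wrec (cs : List Char) : ∀ (ws : List (List Char)) (cur : List Char),
    finB (cs.foldl stepB (ws, cur)) = ws ++ Wrec cur cs := by
  induction cs with
  | nil =>
    intro ws cur
    by_cases h : cur = [] <;> simp [finB, Wrec, h]
  | cons c cs ih =>
    intro ws cur
    simp only [List.foldl_cons]
    by_cases h : allowedC c = true
    · have h' : (PySem.Chars.isalnum c || c == '_') = true := h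
      simp only [stepB, h', if_true, Wrec, h, ih]
    · have h0 : allowedC c = false := Bool.eq_false_iff.mpr h
      have h' : (PySem.Chars.isalnum c || c == '_') = false := h0
      simp only [stepB, h', Bool.false_eq_true, if_false, Wrec, h]
      by_cases hc : cur = []
      · subst hc
        simp [ih]
      · simp only [if_neg hc, ih]
        simp

-- every word list produced by Wrec from a nonempty current word is nonempty
theorem Wrec_ne_nil (cs : List Char) : ∀ cur, cur ≠ [] → Wrec cur cs ≠ [] := by
  induction cs with
  | nil => intro cur h; simp [Wrec, h]
  | cons c cs ih =>
    intro cur h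
    unfold Wrec
    by_cases ha : allowedC c = true
    · simp only [ha, if_true]; exact ih _ (by simp)
    · simp only [ha, Bool.false_eq_true, if_false, if_neg h]; simp

-- B's word list is empty exactly when (SR).1 is
theorem SR1_nil_iff (cs : List Char) : (SR cs).1 = [] ↔ Wrec ([] : List Char) cs = [] := by
  induction cs with
  | nil => simp [SR, Wrec]
  | cons c cs ih =>
    unfold SR Wrec
    by_cases ha : allowedC c = true
    · simp only [ha, if_true]
      constructor
      · intro h; exact absurd h (by simp)
      · intro h; exact absurd h (Wrec_ne_nil cs [c] (by simp))
    · simp only [ha, Bool.false_eq_true, if_false]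
      exact ih

-- join of Wrec: from mid-word mode (cur ≠ []) and from between-words mode, jointly
theorem join_Wrec (cs : List Char) :
    (∀ cur, cur ≠ [] → PySem.Chars.join ['-'] (Wrec cur cs) = cur ++ (SR cs).2)
    ∧ PySem.Chars.join ['-'] (Wrec ([] : List Char) cs) = (SR cs).1 := by
  induction cs with
  | nil =>
    refine ⟨fun cur h => ?_, by simp [Wrec, SR, PySem.Chars.join_nil]⟩
    simp [Wrec, h, SR, PySem.Chars.join_singleton]
  | cons c cs ih =>
    obtain ⟨ihc, ihn⟩ := ih
    constructor
    · intro cur h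
      unfold Wrec SR
      by_cases ha : allowedC c = true
      · simp only [ha, if_true]
        rw [ihc (cur ++ [c]) (by simp)]
        simp
      · simp only [ha, Bool.false_eq_true, if_false, if_neg h]
        by_cases hw : Wrec ([] : List Char) cs = []
        · have hs : (SR cs).1 = [] := (SR1_nil_iff cs).2 hw
          simp [hw, hs, PySem.Chars.join_singleton]
        · obtain ⟨w, ws, hww⟩ := List.exists_cons_of_ne_nil hw
          have hs : (SR cs).1 ≠ [] := fun h' => hw ((SR1_nil_iff cs).1 h')
          rw [hww, PySem.Chars.join_cons_cons, ← hww, ihn]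
          simp [hs]
    · unfold Wrec SR
      by_cases ha : allowedC c = true
      · simp only [ha, if_true]
        rw [ihc ([] ++ [c]) (by simp)]
        simp
      · simp only [ha, Bool.false_eq_true, if_false]
        exact ihn

-- main correspondence between A's scan and B's (S, R)
theorem gA_SR (cs : List Char) :
    (gA false cs = (SR cs).2 ∨ gA false cs = (SR cs).2 ++ ['-'])
    ∧ (gA true cs = (SR cs).1 ∨ ((SR cs).1 ≠ [] ∧ gA true cs = (SR cs).1 ++ ['-'])) := by
  induction cs with
  | nil => simp [gA, SR]
  | cons c cs ih =>
    obtain ⟨ih1, ih2⟩ := ih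
    unfold gA SR
    by_cases ha : allowedC c = true
    · simp only [ha, if_true]
      refine ⟨?_, ?_⟩
      · rcases ih1 with h | h <;> simp [h]
      · rcases ih1 with h | h
        · exact Or.inl (by simp [h])
        · exact Or.inr ⟨by simp, by simp [h]⟩
    · simp only [ha, Bool.false_eq_true, if_false]
      by_cases hs : (SR cs).1 = []
      · have hg : gA true cs = [] := by
          rcases ih2 with h | h
          · rw [h, hs]
          · exact absurd hs h.1
        refine ⟨?_, ?_⟩
        · simp [hg, hs]
        · simp [hg, hs]
      · refine ⟨?_, ?_⟩
        · rcases ih2 with h | h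
          · exact Or.inl (by simp [hs, h])
          · exact Or.inr (by simp [hs, h.2])
        · rcases ih2 with h | h
          · exact Or.inl (by simp [h])
          · exact Or.inr ⟨by simp [hs], by simp [h.2]⟩

theorem strip_lead (x : List Char) :
    PySem.Chars.stripChars ('-' :: x) ['-', '_'] = PySem.Chars.stripChars x ['-', '_'] := by
  simp [PySem.Chars.stripChars, List.dropWhile]

theorem strip_trail (x : List Char) :
    PySem.Chars.stripChars (x ++ ['-']) ['-', '_'] = PySem.Chars.stripChars x ['-', '_'] := by
  show (List.dropWhile (fun c => List.contains ['-', '_'] c)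
      (List.dropWhile (fun c => List.contains ['-', '_'] c) (x ++ ['-'])).reverse).reverse
    = (List.dropWhile (fun c => List.contains ['-', '_'] c)
      (List.dropWhile (fun c => List.contains ['-', '_'] c) x).reverse).reverse
  rw [List.dropWhile_append]
  by_cases h : (List.dropWhile (fun c => List.contains ['-', '_'] c) x).isEmpty = true
  · rw [if_pos h]
    rw [List.isEmpty_iff] at h
    rw [h]
    rfl
  · rw [if_neg h, List.reverse_append]
    have : (['-'] : List Char).reverse = ['-'] := rfl
    rw [this, List.singleton_append, List.dropWhile_cons]
    have hp : (List.contains ['-', '_'] '-') = true := by decide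
    rw [hp]
    simp only [if_true]

-- the strip of A's scan equals the strip of B's joined words
theorem strip_gA_eq_strip_S (cs : List Char) :
    PySem.Chars.stripChars (gA false cs) ['-', '_'] = PySem.Chars.stripChars (SR cs).1 ['-', '_'] := by
  cases cs with
  | nil => rfl
  | cons c cs =>
    have hSR := gA_SR cs
    by_cases ha : allowedC c = true
    · have hA : gA false (c :: cs) = c :: gA false cs := by simp [gA, ha]
      have hS : (SR (c :: cs)).1 = c :: (SR cs).2 := by simp [SR, ha]
      rw [hA, hS]
      rcases hSR.1 with h | h
      · rw [h]
      · rw [h, show (c :: ((SR cs).2 ++ ['-'])) = (c :: (SR cs).2) ++ ['-'] from rfl, strip_trail]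
    · have hA : gA false (c :: cs) = '-' :: gA true cs := by simp [gA, ha]
      have hS : (SR (c :: cs)).1 = (SR cs).1 := by simp [SR, ha]
      rw [hA, hS, strip_lead]
      rcases hSR.2 with h | h
      · rw [h]
      · rw [h.2, strip_trail]

-- A's clean-then-collapse pipeline applied to a char list
def procA (cs : List Char) : List Char :=
  PySem.Chars.stripChars
    (pyMultiDash (cs.map (fun ch => if PySem.Chars.isalnum ch || ch == '-' || ch == '_' then ch else '-')))
    ['-', '_']

-- A's pipeline = gA
theorem procA_eq_gA (cs : List Char) :
    procA cs = PySem.Chars.stripChars (gA false cs) ['-', '_'] := by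
  show PySem.Chars.stripChars (((cs.map fC).foldl stepA ([], false)).1) ['-', '_'] = _
  rw [foldMD_eq_gA, List.nil_append]

-- B's tokenize-and-join computes exactly A's two-pass pipeline
theorem slug_eq (s : String) :
    slugChars s = procA (PySem.Chars.lower (PySem.Chars.strip (if s = "" then "" else s).toList)) := by
  rw [procA_eq_gA]
  show PySem.Chars.stripChars
      (PySem.Chars.join ['-']
        (finB ((PySem.Chars.lower (PySem.Chars.strip (if s = "" then "" else s).toList)).foldl stepB ([], []))))
      ['-', '_'] = _
  rw [foldB_eq_Wrec, List.nil_append, (join_Wrec _).2, ← strip_gA_eq_strip_S]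

theorem procA_nil : procA [] = [] := by decide

theorem procA_bot : procA "bot".toList = "bot".toList := by decide

-- A, written with its clean-then-collapse pipeline abbreviated as procA (definitional)
theorem A_shape (nm fb : String) :
    normalize_container_name nm fb =
      (if procA (PySem.Chars.lower (PySem.Chars.strip (if nm = "" then "" else nm).toList)) = [] then
        String.mk
          (if procA (if PySem.Chars.lower (PySem.Chars.strip (if fb = "" then "bot" else fb).toList) = []
                     then "bot".toList
                     else PySem.Chars.lower (PySem.Chars.strip (if fb = "" then "bot" else fb).toList)) = []
           then "bot".toList
           else procA (if PySem.Chars.lower (PySem.Chars.strip (if fb = "" then "bot" else fb).toList) = []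
                       then "bot".toList
                       else PySem.Chars.lower (PySem.Chars.strip (if fb = "" then "bot" else fb).toList)))
      else String.mk (procA (PySem.Chars.lower (PySem.Chars.strip (if nm = "" then "" else nm).toList)))) := rfl

-- B, likewise (uses slug_eq)
theorem B_shape (nm fb : String) :
    normalize_container_name_alt nm fb =
      (if procA (PySem.Chars.lower (PySem.Chars.strip (if nm = "" then "" else nm).toList)) ≠ [] then
        String.mk (procA (PySem.Chars.lower (PySem.Chars.strip (if nm = "" then "" else nm).toList)))
      else if procA (PySem.Chars.lower (PySem.Chars.strip (if fb = "" then "" else fb).toList)) ≠ [] then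
        String.mk (procA (PySem.Chars.lower (PySem.Chars.strip (if fb = "" then "" else fb).toList)))
      else "bot") := by
  unfold normalize_container_name_alt
  rw [slug_eq, slug_eq]

theorem pvA_eq_B (name fallback : String) :
    normalize_container_name name fallback = normalize_container_name_alt name fallback := by
  rw [A_shape, B_shape]
  by_cases hm : procA (PySem.Chars.lower (PySem.Chars.strip (if name = "" then "" else name).toList)) = []
  · rw [if_pos hm, if_neg (not_not_intro hm)]
    by_cases hf : fallback = ""
    · subst hf
      decide
    · rw [if_neg hf, if_neg hf]
      by_cases hc : PySem.Chars.lower (PySem.Chars.strip fallback.toList) = []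
      · rw [if_pos hc, hc, procA_nil, procA_bot]
        decide
      · rw [if_neg hc]
        by_cases h3 : procA (PySem.Chars.lower (PySem.Chars.strip fallback.toList)) = []
        · rw [if_pos h3, h3, if_neg (not_not_intro rfl)]
          decide
        · rw [if_neg h3, if_pos h3]
  · rw [if_neg hm, if_pos hm]

-- ===== VERDICT (by name: the statement is the Claim_ definition above) =====
theorem normalize_container_name_spec : Claim_equal_normalize_container_name := by
  intro name fallback _
  exact pvA_eq_B name fallback
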